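-- pv_equiv track=rewrite | github.com/Vinayak-Pai/Kaizen | count_ones.py | swap_and_check
-- ===== SOURCE A (Python) =====
-- def swap_and_check(bin_num, index, output):
--     for j in range(len(bin_num)):
--         bin_num_list = list(bin_num)
--         bin_num_list[j], bin_num_list[index] = bin_num_list[index], bin_num_list[j]
--         checked_val = check_longest_ones(bin_num_list)
--         if checked_val > output:
--             output = checked_val
--     return output
--
-- def check_longest_ones(bin_num):
--     cnt_ones = 0
--     ones =0
--     if '0' not in bin_num:
--        ones = len(bin_num)
--     else:
--         for k in range(len(bin_num)):
--             if bin_num[k] == '1':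
--                 cnt_ones = cnt_ones + 1
--                 if cnt_ones > ones:
--                     ones = cnt_ones
--             else:
--                 cnt_ones = 0
--     return ones
-- ===== SOURCE B (Python) =====
-- # O(n) re-implementation: evaluate every swap in O(1) using precomputed run arrays
-- # over the "flipped" mask (mask with the swap index toggled), instead of rebuilding
-- # and rescanning the whole string for each position.
--
-- def _runs(ms):
--     # out[i] = length of the True-run of ms ending at position i
--     out = []
--     r = 0
--     for b in ms:
--         r = r + 1 if b else 0
--         out.append(r)
--     return out
--
--
-- def _maxes(rs):
--     # out[i] = max(rs[:i+1]) (runs are >= 0)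
--     out = []
--     m = 0
--     for r in rs:
--         if r > m:
--             m = r
--         out.append(m)
--     return out
--
--
-- def _longest(ms):
--     r = best = 0
--     for b in ms:
--         r = r + 1 if b else 0
--         if r > best:
--             best = r
--     return best
--
--
-- def swap_and_check(bin_num, index, output):
--     n = len(bin_num)
--     if n == 0:
--         return output
--     if '0' not in bin_num:
--         # every swap leaves the string without '0', so each candidate equals n
--         return output if output > n else n
--     idx = index % n
--     mask = [c == '1' for c in bin_num]
--     flipped = list(mask)
--     flipped[idx] = not mask[idx]
--     run_end = _runs(flipped)                  # run ending at i in flipped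
--     rev = _runs(flipped[::-1])
--     run_start = rev[::-1]                     # run starting at i in flipped
--     best_pre = _maxes(run_end)                # longest run of flipped[:i+1]
--     best_suf = _maxes(rev)[::-1]              # longest run of flipped[i:]
--     base = _longest(mask)                     # swaps of equal characters change nothing
--     best = output
--     if base > best:
--         best = base
--     whole = best_pre[n - 1]                   # longest run of flipped
--     if mask[idx]:
--         # swapping a '1' at idx with a non-'1' at j: mask becomes flipped with j set
--         for j in range(n):
--             if not mask[j]:
--                 cand = (run_end[j - 1] if j > 0 else 0) + 1 + \
--                        (run_start[j + 1] if j + 1 < n else 0)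
--                 if whole > cand:
--                     cand = whole
--                 if cand > best:
--                     best = cand
--     else:
--         # swapping a non-'1' at idx with a '1' at j: mask becomes flipped with j cleared
--         for j in range(n):
--             if mask[j]:
--                 left = best_pre[j - 1] if j > 0 else 0
--                 right = best_suf[j + 1] if j + 1 < n else 0
--                 cand = left if left > right else right
--                 if cand > best:
--                     best = cand
--     return best
-- ===== Notes on version B (the rewrite author's own statement) =====
-- stated objective: faster
-- what changed: Instead of rebuilding and rescanning the whole string for every swap position (O(n) work per position), B precomputes prefix/suffix one-run and best-run arrays over the mask with the swap index toggled and evaluates each swap's longest-ones value in O(1), handling the global no-'0' case (where every candidate equals len) in closed form.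
import Mathlib
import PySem

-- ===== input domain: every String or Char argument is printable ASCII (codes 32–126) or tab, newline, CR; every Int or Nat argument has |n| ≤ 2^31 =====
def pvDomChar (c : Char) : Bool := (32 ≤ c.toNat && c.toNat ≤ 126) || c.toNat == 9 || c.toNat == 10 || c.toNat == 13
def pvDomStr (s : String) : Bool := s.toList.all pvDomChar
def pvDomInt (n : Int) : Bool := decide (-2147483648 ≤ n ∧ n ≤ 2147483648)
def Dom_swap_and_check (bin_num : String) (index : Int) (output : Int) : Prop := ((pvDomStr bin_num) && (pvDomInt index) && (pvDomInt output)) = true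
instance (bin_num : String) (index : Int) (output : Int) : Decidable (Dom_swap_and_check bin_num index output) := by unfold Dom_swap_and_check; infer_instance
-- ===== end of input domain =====

-- B re-implements A with precomputed run arrays so each swap is evaluated in O(1)
-- instead of rebuilding and rescanning the string per position (equal return values
-- on Pre_; no observable mutation in either program).


-- ===== PORT A =====
-- check_longest_ones: the index loop 'for k in range(len(bin_num))' reads bin_num[k]
-- in order, ported as a fold over the characters with the same (cnt_ones, ones) state.
def checkLongestOnes (l : List Char) : Int :=
  if ¬ ('0' ∈ l) then (l.length : Int)
  else
    (l.foldl (fun (s : Int × Int) c =>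
      if c = '1' then
        (s.1 + 1, if s.1 + 1 > s.2 then s.1 + 1 else s.2)
      else (0, s.2)) ((0 : Int), (0 : Int))).2

def swap_and_check (bin_num : String) (index : Int) (output : Int) : Int :=
  (List.range bin_num.length).foldl (fun out j =>
    let l := bin_num.toList
    match PySem.List.pyGet? l index with          -- bin_num_list[index]; none = IndexError, outside Pre_
    | none => out
    | some ci =>
      let cj := l.getD j ' '                      -- bin_num_list[j], j < len so in range
      let i := (if index < 0 then index + l.length else index).toNat   -- the position written by l[index] = cj
      let l2 := (l.set j ci).set i cj
      let v := checkLongestOnes l2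
      if v > out then v else out) output

-- ===== PORT B =====
-- _runs: out[i] = length of the True-run ending at i (r is the loop carry)
def pvRuns (ms : List Bool) (r : Int) : List Int :=
  match ms with
  | [] => []
  | b :: t => let r' := if b then r + 1 else 0
              r' :: pvRuns t r'

-- _maxes: out[i] = running maximum of the prefix (m is the loop carry)
def pvMaxes (rs : List Int) (m : Int) : List Int :=
  match rs with
  | [] => []
  | r :: t => let m' := if r > m then r else m
              m' :: pvMaxes t m'

-- _longest: longest True-run, single scan
def pvLongest (ms : List Bool) : Int :=
  (ms.foldl (fun (s : Int × Int) b =>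
    let r := if b then s.1 + 1 else 0
    (r, if r > s.2 then r else s.2)) ((0 : Int), (0 : Int))).2

def swap_and_check_alt (bin_num : String) (index : Int) (output : Int) : Int :=
  let l := bin_num.toList
  let n := l.length
  if n = 0 then output
  else if ¬ ('0' ∈ l) then (if output > (n : Int) then output else (n : Int))
  else
    let idx := (PySem.Int.mod index (n : Int)).toNat  -- index % n, in [0, n) since n > 0
    let mask := l.map (fun c => c == '1')
    let flipped := mask.set idx (! mask.getD idx false)
    let run_end := pvRuns flipped 0
    let rev := pvRuns flipped.reverse 0
    let run_start := rev.reverse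
    let best_pre := pvMaxes run_end 0
    let best_suf := (pvMaxes rev 0).reverse
    let base := pvLongest mask
    let best0 := if base > output then base else output
    let whole := best_pre.getD (n - 1) 0
    if mask.getD idx false then
      (List.range n).foldl (fun best j =>
        if ! mask.getD j false then
          let cand0 := (if 0 < j then run_end.getD (j - 1) 0 else 0) + 1 +
                       (if j + 1 < n then run_start.getD (j + 1) 0 else 0)
          let cand := if whole > cand0 then whole else cand0
          if cand > best then cand else best
        else best) best0
    else
      (List.range n).foldl (fun best j =>
        if mask.getD j false then
          let left := if 0 < j then best_pre.getD (j - 1) 0 else 0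
          let right := if j + 1 < n then best_suf.getD (j + 1) 0 else 0
          let cand := if left > right then left else right
          if cand > best then cand else best
        else best) best0

-- ===== PRECONDITION & SPEC =====
-- Pre_ excludes exactly the inputs where Python A raises IndexError: a non-empty
-- string with index outside [-len, len).
def Pre_swap_and_check (bin_num : String) (index : Int) (output : Int) : Prop :=
  bin_num.length = 0 ∨ (-(bin_num.length : Int) ≤ index ∧ index < (bin_num.length : Int))
instance (bin_num : String) (index : Int) (output : Int) : Decidable (Pre_swap_and_check bin_num index output) := by unfold Pre_swap_and_check; infer_instance

def pvWitness_swap_and_check : String × Int × Int := ("0110", 1, 0)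

def Spec_swap_and_check (bin_num : String) (index : Int) (output : Int) (out : Int) : Prop := out = swap_and_check_alt bin_num index output
instance (bin_num : String) (index : Int) (output : Int) (out : Int) : Decidable (Spec_swap_and_check bin_num index output out) := by unfold Spec_swap_and_check; infer_instance

-- ===== CLAIM (what is proved, stated in full; the proofs are below) =====
def Claim_equal_swap_and_check : Prop := ∀ (bin_num : String) (index : Int) (output : Int), Dom_swap_and_check bin_num index output → Pre_swap_and_check bin_num index output → Spec_swap_and_check bin_num index output (swap_and_check bin_num index output)

-- ===== LEMMAS AND PROOFS =====

-- ---- longest-run theory over List Bool ----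
def pvLead : List Bool → Int
  | [] => 0
  | b :: t => if b then pvLead t + 1 else 0

def pvTrail (l : List Bool) : Int := pvLead l.reverse

def pvBest : List Bool → Int
  | [] => 0
  | b :: t => if b then max (pvLead t + 1) (pvBest t) else pvBest t

theorem pvLead_nonneg (l : List Bool) : 0 ≤ pvLead l := by
  induction l with
  | nil => simp [pvLead]
  | cons b t ih => simp only [pvLead]; split <;> omega

theorem pvBest_nonneg (l : List Bool) : 0 ≤ pvBest l := by
  induction l with
  | nil => simp [pvBest]
  | cons b t ih =>
    simp only [pvBest]; split
    · exact le_max_of_le_right ih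
    · exact ih

theorem pvLead_le_pvBest (l : List Bool) : pvLead l ≤ pvBest l := by
  cases l with
  | nil => simp [pvLead, pvBest]
  | cons b t =>
    simp only [pvLead, pvBest]; split
    · exact le_max_left _ _
    · exact pvBest_nonneg t

theorem pvLead_le_length (l : List Bool) : pvLead l ≤ l.length := by
  induction l with
  | nil => simp [pvLead]
  | cons b t ih => simp only [pvLead, List.length_cons]; push_cast; split <;> omega

theorem pvBest_le_length (l : List Bool) : pvBest l ≤ l.length := by
  induction l with
  | nil => simp [pvBest]
  | cons b t ih =>
    have h1 := pvLead_le_length t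
    simp only [pvBest, List.length_cons]; push_cast
    split
    · rw [max_le_iff]; omega
    · omega

theorem pvLead_append (a b : List Bool) :
    pvLead (a ++ b) = if pvLead a = a.length then a.length + pvLead b else pvLead a := by
  induction a with
  | nil => simp [pvLead]
  | cons x t ih =>
    have h1 := pvLead_le_length t
    simp only [List.cons_append, pvLead, List.length_cons, ih]
    push_cast
    split_ifs <;> omega

theorem pvTrail_nonneg (l : List Bool) : 0 ≤ pvTrail l := pvLead_nonneg _

theorem pvTrail_snoc (l : List Bool) (b : Bool) :
    pvTrail (l ++ [b]) = if b then pvTrail l + 1 else 0 := by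
  simp [pvTrail, pvLead]

theorem pvLead_eq_length_iff (l : List Bool) : pvLead l = l.length ↔ ∀ x ∈ l, x = true := by
  induction l with
  | nil => simp [pvLead]
  | cons b t ih =>
    have h1 := pvLead_le_length t
    cases b
    · simp only [pvLead, if_neg Bool.false_ne_true, List.length_cons]
      push_cast
      constructor
      · omega
      · intro h; exact absurd (h false (List.mem_cons_self)) (by simp)
    · simp only [pvLead, eq_self_iff_true, ite_true, List.length_cons, List.mem_cons]
      push_cast
      constructor
      · intro h x hx
        rcases hx with rfl | hx
        · rfl
        · exact (ih.1 (by omega)) x hx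
      · intro h
        have : pvLead t = (t.length : Int) := ih.2 (fun x hx => h x (Or.inr hx))
        omega

theorem pvTrail_eq_length_iff (l : List Bool) : pvTrail l = l.length ↔ ∀ x ∈ l, x = true := by
  rw [pvTrail, show ((l.length : Int)) = (l.reverse.length : Int) by simp, pvLead_eq_length_iff]
  simp

theorem pvTrail_cons (x : Bool) (t : List Bool) :
    pvTrail (x :: t) = if pvTrail t = (t.length : Int) then (t.length : Int) + (if x then 1 else 0) else pvTrail t := by
  have : pvTrail (x :: t) = pvLead (t.reverse ++ [x]) := by simp [pvTrail]
  rw [this, pvLead_append, List.length_reverse]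
  have : pvLead t.reverse = pvTrail t := rfl
  rw [this]
  cases x <;> simp [pvLead]

theorem pvTrail_le_pvBest (l : List Bool) : pvTrail l ≤ pvBest l := by
  induction l with
  | nil => simp [pvTrail, pvLead, pvBest]
  | cons x t ih =>
    rw [pvTrail_cons]
    by_cases h : pvTrail t = (t.length : Int)
    · have hall : ∀ y ∈ t, y = true := (pvTrail_eq_length_iff t).1 h
      have hlead : pvLead t = (t.length : Int) := (pvLead_eq_length_iff t).2 hall
      rw [if_pos h]
      cases x
      · simp only [pvBest, if_neg Bool.false_ne_true]
        omega
      · simp only [pvBest, eq_self_iff_true, ite_true]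
        have : (t.length : Int) + 1 ≤ max (pvLead t + 1) (pvBest t) := by
          rw [le_max_iff]; omega
        simpa using this
    · rw [if_neg h]
      cases x
      · simpa [pvBest] using ih
      · simp only [pvBest, eq_self_iff_true, ite_true]
        exact le_max_of_le_right ih

theorem pvBest_append (a b : List Bool) :
    pvBest (a ++ b) = max (pvBest a) (max (pvBest b) (pvTrail a + pvLead b)) := by
  induction a with
  | nil =>
    have h1 := pvLead_le_pvBest b
    have h2 := pvBest_nonneg b
    simp only [List.nil_append, pvBest, pvTrail, List.reverse_nil, pvLead, Int.max_def]
    split_ifs <;> omega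
  | cons x t ih =>
    have h2 := pvLead_le_length t
    have h3 := pvBest_le_length t
    have h4 := pvLead_le_pvBest t
    have h5 := pvBest_nonneg b
    have h6 := pvLead_le_pvBest b
    have h7 := pvTrail_nonneg t
    have h8 := pvTrail_le_pvBest t
    have h9 := pvLead_nonneg b
    have hiff : (pvTrail t = (t.length : Int)) ↔ (pvLead t = (t.length : Int)) := by
      rw [pvTrail_eq_length_iff, pvLead_eq_length_iff]
    simp only [List.cons_append, pvBest, pvLead_append, ih, pvTrail_cons, List.length_cons]
    by_cases hall : pvLead t = (t.length : Int)
    · have hbt : pvBest t = (t.length : Int) := by omega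
      rw [if_pos hall, if_pos (hiff.2 hall), hbt]
      cases x <;> simp only [eq_self_iff_true, ite_true, if_neg Bool.false_ne_true, Int.max_def] <;>
        push_cast <;> split_ifs <;> omega
    · rw [if_neg hall, if_neg (fun h => hall (hiff.1 h))]
      cases x <;> simp only [eq_self_iff_true, ite_true, if_neg Bool.false_ne_true, Int.max_def] <;>
        split_ifs <;> omega

theorem pvBest_snoc (l : List Bool) (b : Bool) :
    pvBest (l ++ [b]) = if b then max (pvBest l) (pvTrail l + 1) else pvBest l := by
  have h1 := pvTrail_le_pvBest l
  have h2 := pvTrail_nonneg l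
  have h3 := pvBest_nonneg l
  rw [pvBest_append]
  cases b <;> simp only [pvBest, pvLead, eq_self_iff_true, ite_true, if_neg Bool.false_ne_true, Int.max_def] <;>
    split_ifs <;> omega

theorem pvBest_reverse (l : List Bool) : pvBest l.reverse = pvBest l := by
  induction l with
  | nil => simp
  | cons x t ih =>
    rw [List.reverse_cons, pvBest_snoc, ih]
    have : pvTrail t.reverse = pvLead t := by simp [pvTrail]
    rw [this]
    cases x
    · simp [pvBest]
    · simp only [pvBest, eq_self_iff_true, ite_true]
      rw [max_comm]

theorem pvBest_mid_false (a b : List Bool) :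
    pvBest (a ++ false :: b) = max (pvBest a) (pvBest b) := by
  have h1 := pvTrail_le_pvBest a
  have h2 := pvBest_nonneg b
  rw [pvBest_append]
  simp only [pvBest, pvLead, if_neg Bool.false_ne_true, Int.max_def]
  split_ifs <;> omega

theorem pvBest_mid_true (a b : List Bool) :
    pvBest (a ++ true :: b) = max (max (pvBest a) (pvBest b)) (pvTrail a + 1 + pvLead b) := by
  have h1 := pvTrail_le_pvBest a
  have h2 := pvBest_nonneg b
  have h3 := pvLead_le_pvBest b
  have h4 := pvTrail_nonneg a
  have h5 := pvLead_nonneg b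
  rw [pvBest_append]
  simp only [pvBest, pvLead, eq_self_iff_true, ite_true, Int.max_def]
  split_ifs <;> omega

-- ---- the scans of both ports compute pvBest ----
theorem scan_eq_pvBest (bl : List Bool) : ∀ (c b : Int), 0 ≤ c → c ≤ b →
    (bl.foldl (fun (s : Int × Int) x =>
      (if x then s.1 + 1 else 0,
       if (if x then s.1 + 1 else 0) > s.2 then (if x then s.1 + 1 else 0) else s.2)) (c, b)).2
    = max b (max (pvBest bl) (c + pvLead bl)) := by
  induction bl with
  | nil =>
    intro c b hc hcb
    simp only [List.foldl_nil, pvBest, pvLead, Int.max_def]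
    split_ifs <;> omega
  | cons x t ih =>
    intro c b hc hcb
    have h1 := pvLead_nonneg t
    have h2 := pvLead_le_pvBest t
    have h3 := pvBest_nonneg t
    simp only [List.foldl_cons]
    cases x
    · simp only [if_neg Bool.false_ne_true]
      rw [ih 0 (if (0:Int) > b then 0 else b) le_rfl (by split <;> omega)]
      simp only [pvBest, pvLead, if_neg Bool.false_ne_true, Int.max_def]
      split_ifs <;> omega
    · simp only [eq_self_iff_true, ite_true]
      rw [ih (c+1) (if c + 1 > b then c + 1 else b) (by omega) (by split <;> omega)]
      simp only [pvBest, pvLead, eq_self_iff_true, ite_true, Int.max_def]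
      split_ifs <;> omega

theorem pvLongest_eq_pvBest (ms : List Bool) : pvLongest ms = pvBest ms := by
  have h := scan_eq_pvBest ms 0 0 le_rfl le_rfl
  have h1 := pvLead_nonneg ms
  have h2 := pvLead_le_pvBest ms
  have h3 := pvBest_nonneg ms
  unfold pvLongest
  simp only [] at h ⊢
  rw [h]
  simp only [Int.max_def]
  split_ifs <;> omega

theorem scanA_eq_pvBest (l : List Char) : ∀ (c b : Int), 0 ≤ c → c ≤ b →
    (l.foldl (fun (s : Int × Int) c' =>
      if c' = '1' then (s.1 + 1, if s.1 + 1 > s.2 then s.1 + 1 else s.2)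
      else (0, s.2)) (c, b)).2
    = max b (max (pvBest (l.map (fun c' => c' == '1'))) (c + pvLead (l.map (fun c' => c' == '1')))) := by
  induction l with
  | nil =>
    intro c b hc hcb
    simp only [List.foldl_nil, List.map_nil, pvBest, pvLead, Int.max_def]
    split_ifs <;> omega
  | cons x t ih =>
    intro c b hc hcb
    have h1 := pvLead_nonneg (t.map (fun c' => c' == '1'))
    have h2 := pvLead_le_pvBest (t.map (fun c' => c' == '1'))
    have h3 := pvBest_nonneg (t.map (fun c' => c' == '1'))
    simp only [List.foldl_cons, List.map_cons]
    by_cases hx : x = '1'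
    · rw [if_pos hx, ih (c+1) (if c + 1 > b then c + 1 else b) (by omega) (by split <;> omega)]
      simp only [hx, pvBest, pvLead, eq_self_iff_true, ite_true, beq_self_eq_true, Int.max_def]
      split_ifs <;> omega
    · rw [if_neg hx, ih 0 b le_rfl (by omega)]
      have hbe : (x == '1') = false := by simpa using hx
      simp only [hbe, pvBest, pvLead, if_neg Bool.false_ne_true, Int.max_def]
      split_ifs <;> omega

theorem checkLongestOnes_eq (l : List Char) (h : '0' ∈ l) :
    checkLongestOnes l = pvBest (l.map (fun c => c == '1')) := by
  have h1 := pvLead_nonneg (l.map (fun c => c == '1'))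
  have h2 := pvLead_le_pvBest (l.map (fun c => c == '1'))
  have h3 := pvBest_nonneg (l.map (fun c => c == '1'))
  rw [checkLongestOnes, if_neg (by simpa using h)]
  rw [scanA_eq_pvBest l 0 0 le_rfl le_rfl]
  simp only [Int.max_def]
  split_ifs <;> omega

-- ---- pvRuns / pvMaxes element characterisation ----
def pvCarry (r : Int) : List Bool → Int
  | [] => r
  | b :: t => pvCarry (if b then r + 1 else 0) t

def pvMCarry (m : Int) : List Int → Int
  | [] => m
  | r :: t => pvMCarry (if r > m then r else m) t

theorem length_pvRuns (l : List Bool) (r : Int) : (pvRuns l r).length = l.length := by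
  induction l generalizing r with
  | nil => simp [pvRuns]
  | cons b t ih => simp [pvRuns, ih]

theorem length_pvMaxes (rs : List Int) (m : Int) : (pvMaxes rs m).length = rs.length := by
  induction rs generalizing m with
  | nil => simp [pvMaxes]
  | cons r t ih => simp [pvMaxes, ih]

theorem pvRuns_getD (l : List Bool) : ∀ (i : Nat) (r : Int), i < l.length →
    (pvRuns l r).getD i 0 = pvCarry r (l.take (i + 1)) := by
  induction l with
  | nil => intro i r h; simp at h
  | cons b t ih =>
    intro i r h
    cases i with
    | zero => simp [pvRuns, pvCarry]
    | succ i =>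
      simp only [pvRuns, List.getD_cons_succ, List.take_succ_cons, pvCarry]
      exact ih i _ (by simpa using h)

theorem pvMaxes_getD (rs : List Int) : ∀ (i : Nat) (m : Int), i < rs.length →
    (pvMaxes rs m).getD i 0 = pvMCarry m (rs.take (i + 1)) := by
  induction rs with
  | nil => intro i m h; simp at h
  | cons r t ih =>
    intro i m h
    cases i with
    | zero => simp [pvMaxes, pvMCarry]
    | succ i =>
      simp only [pvMaxes, List.getD_cons_succ, List.take_succ_cons, pvMCarry]
      exact ih i _ (by simpa using h)

theorem pvCarry_snoc (l : List Bool) : ∀ (r : Int) (b : Bool),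
    pvCarry r (l ++ [b]) = if b then pvCarry r l + 1 else 0 := by
  induction l with
  | nil => intro r b; simp [pvCarry]
  | cons x t ih => intro r b; simp only [List.cons_append, pvCarry, ih]

theorem pvCarry_zero (l : List Bool) : pvCarry 0 l = pvTrail l := by
  induction l using List.reverseRecOn with
  | nil => simp [pvCarry, pvTrail, pvLead]
  | append_singleton t b ih => rw [pvCarry_snoc, pvTrail_snoc, ih]

theorem take_pvRuns (l : List Bool) : ∀ (k : Nat) (r : Int),
    (pvRuns l r).take k = pvRuns (l.take k) r := by
  induction l with
  | nil => intro k r; simp [pvRuns]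
  | cons b t ih =>
    intro k r
    cases k with
    | zero => simp [pvRuns]
    | succ k => simp only [pvRuns, List.take_succ_cons, ih]

theorem pvRuns_snoc (l : List Bool) : ∀ (r : Int) (b : Bool),
    pvRuns (l ++ [b]) r = pvRuns l r ++ [if b then pvCarry r l + 1 else 0] := by
  induction l with
  | nil => intro r b; simp [pvRuns, pvCarry]
  | cons x t ih => intro r b; simp only [List.cons_append, pvRuns, ih, pvCarry]

theorem pvMCarry_snoc (rs : List Int) : ∀ (m r : Int),
    pvMCarry m (rs ++ [r]) = if r > pvMCarry m rs then r else pvMCarry m rs := by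
  induction rs with
  | nil => intro m r; simp [pvMCarry]
  | cons x t ih => intro m r; simp only [List.cons_append, pvMCarry, ih]

theorem pvMCarry_pvRuns (l : List Bool) : pvMCarry 0 (pvRuns l 0) = pvBest l := by
  induction l using List.reverseRecOn with
  | nil => simp [pvRuns, pvMCarry, pvBest]
  | append_singleton t b ih =>
    rw [pvRuns_snoc, pvMCarry_snoc, ih, pvCarry_zero, pvBest_snoc]
    have h1 := pvTrail_le_pvBest t
    have h2 := pvBest_nonneg t
    cases b <;> simp only [eq_self_iff_true, ite_true, if_neg Bool.false_ne_true, Int.max_def] <;>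
      split_ifs <;> omega

theorem runEnd_getD (l : List Bool) (i : Nat) (h : i < l.length) :
    (pvRuns l 0).getD i 0 = pvTrail (l.take (i + 1)) := by
  rw [pvRuns_getD l i 0 h, pvCarry_zero]

theorem bestPre_getD (l : List Bool) (i : Nat) (h : i < l.length) :
    (pvMaxes (pvRuns l 0) 0).getD i 0 = pvBest (l.take (i + 1)) := by
  rw [pvMaxes_getD (pvRuns l 0) i 0 (by rw [length_pvRuns]; exact h),
      take_pvRuns, pvMCarry_pvRuns]

theorem runStart_getD (l : List Bool) (k : Nat) (h : k < l.length) :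
    (pvRuns l.reverse 0).reverse.getD k 0 = pvLead (l.drop k) := by
  have hlen : (pvRuns l.reverse 0).length = l.length := by
    rw [length_pvRuns, List.length_reverse]
  have hk : k < (pvRuns l.reverse 0).reverse.length := by simpa [hlen] using h
  rw [List.getD_eq_getElem _ _ hk, List.getElem_reverse]
  have h2 : (pvRuns l.reverse 0).length - 1 - k < (pvRuns l.reverse 0).length := by omega
  rw [← List.getD_eq_getElem _ 0 h2, hlen]
  rw [runEnd_getD l.reverse (l.length - 1 - k) (by simp; omega)]
  have h3 : l.length - 1 - k + 1 = l.length - k := by omega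
  rw [h3, ← List.reverse_drop]
  show pvLead (l.drop k).reverse.reverse = _
  rw [List.reverse_reverse]

theorem bestSuf_getD (l : List Bool) (k : Nat) (h : k < l.length) :
    (pvMaxes (pvRuns l.reverse 0) 0).reverse.getD k 0 = pvBest (l.drop k) := by
  have hlen : (pvMaxes (pvRuns l.reverse 0) 0).length = l.length := by
    rw [length_pvMaxes, length_pvRuns, List.length_reverse]
  have hk : k < (pvMaxes (pvRuns l.reverse 0) 0).reverse.length := by simpa [hlen] using h
  rw [List.getD_eq_getElem _ _ hk, List.getElem_reverse]
  have h2 : (pvMaxes (pvRuns l.reverse 0) 0).length - 1 - k < (pvMaxes (pvRuns l.reverse 0) 0).length := by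
    omega
  rw [← List.getD_eq_getElem _ 0 h2, hlen]
  rw [bestPre_getD l.reverse (l.length - 1 - k) (by simp; omega)]
  have h3 : l.length - 1 - k + 1 = l.length - k := by omega
  rw [h3, ← List.reverse_drop, pvBest_reverse]

-- ---- the swapped list ----
theorem l2_getElem (l : List Char) (i j : Nat) (hi : i < l.length) (hj : j < l.length)
    (k : Nat) (hk : k < ((l.set j l[i]).set i l[j]).length) :
    ((l.set j l[i]).set i l[j])[k] =
      if k = i then l[j]'hj else if k = j then l[i]'hi else l[k]'(by simpa using hk) := by
  simp only [List.getElem_set]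
  by_cases h1 : k = i
  · subst h1; simp
  · by_cases h2 : k = j
    · subst h2; simp [Ne.symm h1, h1]
    · simp [Ne.symm h1, Ne.symm h2, h1, h2]

theorem swap_mem (l : List Char) (i j : Nat) (hi : i < l.length) (hj : j < l.length) (x : Char) :
    x ∈ (l.set j l[i]).set i l[j] ↔ x ∈ l := by
  have hlen : ((l.set j l[i]).set i l[j]).length = l.length := by simp
  constructor
  · intro hx
    rw [List.mem_iff_getElem] at hx ⊢
    obtain ⟨k, hk, he⟩ := hx
    rw [l2_getElem l i j hi hj k hk] at he
    split_ifs at he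
    · exact ⟨j, hj, he⟩
    · exact ⟨i, hi, he⟩
    · exact ⟨k, by simpa using hk, he⟩
  · intro hx
    rw [List.mem_iff_getElem] at hx ⊢
    obtain ⟨k, hk, he⟩ := hx
    by_cases h1 : k = i
    · refine ⟨j, by omega, ?_⟩
      rw [l2_getElem l i j hi hj j (by omega)]
      subst h1
      by_cases h2 : j = k
      · subst h2; simpa using he
      · rw [if_neg h2, if_pos rfl]; exact he
    · by_cases h2 : k = j
      · refine ⟨i, by omega, ?_⟩
        rw [l2_getElem l i j hi hj i (by omega)]
        subst h2
        rw [if_pos rfl]; exact he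
      · refine ⟨k, by omega, ?_⟩
        rw [l2_getElem l i j hi hj k (by omega)]
        rw [if_neg h1, if_neg h2]; exact he

-- ---- fold shapes ----
theorem fold_const (v : Int) : ∀ (js : List Nat) (out : Int), js ≠ [] →
    js.foldl (fun o (_ : Nat) => max o v) out = max out v := by
  intro js
  induction js with
  | nil => intro out h; exact absurd rfl h
  | cons j t ih =>
    intro out _
    simp only [List.foldl_cons]
    rcases eq_or_ne t [] with rfl | ht
    · simp only [List.foldl_nil]
    · rw [ih _ ht]; simp only [Int.max_def]; split_ifs <;> omega

theorem fold_pair (f g : Nat → Int) (P : Nat → Bool) (L : Int) (idx : Nat)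
    (hPidx : P idx = false) :
    ∀ (js : List Nat) (a b : Int),
      (∀ j ∈ js, P j = true → f j = g j) → (∀ j ∈ js, P j = false → f j = L) →
      ((b = max a L ∧ idx ∈ js) ∨ (a = b ∧ L ≤ a)) →
      js.foldl (fun x j => max x (f j)) a
        = js.foldl (fun x j => if P j then (if g j > x then g j else x) else x) b := by
  intro js
  induction js with
  | nil =>
    intro a b _ _ inv
    rcases inv with ⟨_, hmem⟩ | ⟨hab, _⟩
    · exact absurd hmem (List.not_mem_nil)
    · simpa using hab
  | cons j t ih =>
    intro a b hfg hf inv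
    simp only [List.foldl_cons]
    cases hP : P j with
    | false =>
      rw [if_neg (by simp [hP])]
      have hfjL : f j = L := hf j List.mem_cons_self hP
      apply ih _ _ (fun x hx => hfg x (List.mem_cons_of_mem _ hx))
        (fun x hx => hf x (List.mem_cons_of_mem _ hx))
      rcases inv with ⟨hb, _⟩ | ⟨hab, hLa⟩
      · refine Or.inr ⟨?_, ?_⟩
        · rw [hfjL, hb]
        · rw [hfjL]; exact le_max_right _ _
      · refine Or.inr ⟨?_, le_trans hLa (le_max_left _ _)⟩
        rw [hfjL, max_eq_left hLa, hab]
    | true =>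
      rw [if_pos (by simp [hP])]
      have hifmax : (fun x : Int => if g j > x then g j else x) b = max b (g j) := by
        simp only [Int.max_def]; split_ifs <;> omega
      simp only at hifmax
      rw [hifmax]
      have hfgj : f j = g j := hfg j List.mem_cons_self hP
      apply ih _ _ (fun x hx => hfg x (List.mem_cons_of_mem _ hx))
        (fun x hx => hf x (List.mem_cons_of_mem _ hx))
      rcases inv with ⟨hb, hmem⟩ | ⟨hab, hLa⟩
      · have hji : j ≠ idx := fun h => by rw [h, hPidx] at hP; exact Bool.false_ne_true hP
        have hmem' : idx ∈ t := by
          rcases List.mem_cons.1 hmem with h | h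
          · exact absurd h.symm hji
          · exact h
        refine Or.inl ⟨?_, hmem'⟩
        rw [← hfgj, hb, max_right_comm]
      · refine Or.inr ⟨?_, le_trans hLa (le_max_left _ _)⟩
        rw [hab, hfgj]

-- ---- per-position candidate characterisation ----
theorem cand_same (l : List Char) (i0 j : Nat) (hi : i0 < l.length) (hj : j < l.length)
    (h0 : '0' ∈ l)
    (heq : (l[j]'hj == '1') = (l[i0]'hi == '1')) :
    checkLongestOnes ((l.set j (l[i0]'hi)).set i0 (l[j]'hj))
      = pvBest (l.map (fun c => c == '1')) := by
  rw [checkLongestOnes_eq _ ((swap_mem l i0 j hi hj '0').2 h0)]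
  congr 1
  rw [List.map_set, List.map_set]
  have hmj : (l.map (fun c => c == '1'))[j]'(by simpa using hj) = (l[j]'hj == '1') := by
    simp
  have hmi0 : (l.map (fun c => c == '1'))[i0]'(by simpa using hi) = (l[i0]'hi == '1') := by
    simp
  rw [← heq, ← hmj, List.set_getElem_self, hmj, heq, ← hmi0, List.set_getElem_self]

theorem cand_true_case (l : List Char) (i0 j : Nat) (hi : i0 < l.length) (hj : j < l.length)
    (h0 : '0' ∈ l)
    (hmi : (l[i0]'hi == '1') = true) (hmj : (l[j]'hj == '1') = false) :
    checkLongestOnes ((l.set j (l[i0]'hi)).set i0 (l[j]'hj))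
      = max (pvBest ((l.map (fun c => c == '1')).set i0 false))
            (pvTrail (((l.map (fun c => c == '1')).set i0 false).take j) + 1 +
             pvLead (((l.map (fun c => c == '1')).set i0 false).drop (j + 1))) := by
  have hij : i0 ≠ j := by
    intro h; subst h; rw [hmi] at hmj; exact absurd hmj (by simp)
  rw [checkLongestOnes_eq _ ((swap_mem l i0 j hi hj '0').2 h0)]
  rw [List.map_set, List.map_set, hmi, hmj]
  rw [List.set_comm _ _ (Ne.symm hij)]
  set F := (l.map (fun c => c == '1')).set i0 false with hF
  have hFlen : F.length = l.length := by simp [hF]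
  have hjF : j < F.length := by omega
  have hFj : F[j]'hjF = false := by
    simp only [hF, List.getElem_set, if_neg hij]
    simpa using hmj
  have hdecomp : F = F.take j ++ false :: F.drop (j + 1) := by
    have h1 : F.set j (F[j]'hjF) = F := List.set_getElem_self hjF
    rw [hFj] at h1
    conv_lhs => rw [← h1]
    exact List.set_eq_take_cons_drop false hjF
  have hset : F.set j true = F.take j ++ true :: F.drop (j + 1) :=
    List.set_eq_take_cons_drop true hjF
  rw [hset]
  conv_rhs => rw [hdecomp]
  rw [pvBest_mid_true, pvBest_mid_false]
  have ht : (List.take j F).length = j := by rw [List.length_take]; omega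
  have gen1 : ∀ (a b : List Bool), a.length = j → List.take j (a ++ b) = a := by
    intro a b h; subst h; exact List.take_left ..
  have gen2 : ∀ (a b : List Bool), a.length = j + 1 → List.drop (j + 1) (a ++ b) = b := by
    intro a b h; rw [← h]; exact List.drop_left ..
  have e1 : List.take j (List.take j F ++ false :: List.drop (j+1) F) = List.take j F :=
    gen1 _ _ ht
  have e2 : List.drop (j+1) (List.take j F ++ false :: List.drop (j+1) F) = List.drop (j+1) F := by
    have hsh : List.take j F ++ false :: List.drop (j+1) F
        = (List.take j F ++ [false]) ++ List.drop (j+1) F := by simp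
    rw [hsh]
    exact gen2 _ _ (by simp [ht])
  rw [e1, e2]

theorem cand_false_case (l : List Char) (i0 j : Nat) (hi : i0 < l.length) (hj : j < l.length)
    (h0 : '0' ∈ l)
    (hmi : (l[i0]'hi == '1') = false) (hmj : (l[j]'hj == '1') = true) :
    checkLongestOnes ((l.set j (l[i0]'hi)).set i0 (l[j]'hj))
      = max (pvBest (((l.map (fun c => c == '1')).set i0 true).take j))
            (pvBest (((l.map (fun c => c == '1')).set i0 true).drop (j + 1))) := by
  have hij : i0 ≠ j := by
    intro h; subst h; rw [hmi] at hmj; exact absurd hmj (by simp)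
  rw [checkLongestOnes_eq _ ((swap_mem l i0 j hi hj '0').2 h0)]
  rw [List.map_set, List.map_set, hmi, hmj]
  rw [List.set_comm _ _ (Ne.symm hij)]
  set F := (l.map (fun c => c == '1')).set i0 true with hF
  have hFlen : F.length = l.length := by simp [hF]
  have hjF : j < F.length := by omega
  have hFj : F[j]'hjF = true := by
    simp only [hF, List.getElem_set, if_neg hij]
    simpa using hmj
  have hset : F.set j false = F.take j ++ false :: F.drop (j + 1) :=
    List.set_eq_take_cons_drop false hjF
  rw [hset, pvBest_mid_false]

theorem main_eq (bin_num : String) (index output : Int)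
    (hpre : Pre_swap_and_check bin_num index output) :
    swap_and_check bin_num index output = swap_and_check_alt bin_num index output := by
  have hlen : bin_num.length = bin_num.toList.length := by simp
  rcases Nat.eq_zero_or_pos bin_num.toList.length with hn0 | hnpos
  · rw [swap_and_check, swap_and_check_alt]
    simp [hlen, hn0]
  · obtain ⟨hge, hlt⟩ : -(bin_num.toList.length : Int) ≤ index ∧ index < (bin_num.toList.length : Int) := by
      rcases hpre with h | h
      · rw [hlen] at h; omega
      · rw [hlen] at h; exact h
    set l := bin_num.toList with hl
    set i0 : Nat := (if index < 0 then index + (l.length : Int) else index).toNat with hi0def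
    have hite : (if index < 0 then index + (l.length : Int) else index) = (i0 : Int) := by
      rw [hi0def]; split_ifs <;> omega
    have hi0lt : i0 < l.length := by
      rw [hi0def]; split_ifs <;> omega
    have hpy : PySem.List.pyGet? l index = some (l[i0]'hi0lt) := by
      by_cases hneg : index < 0
      · have hk1 : 0 < (-index).toNat := by omega
        have hk2 : (-index).toNat ≤ l.length := by omega
        have hidxeq : index = -(((-index).toNat : Nat) : Int) := by omega
        rw [hidxeq, PySem.List.pyGet?_neg_natCast l _ hk1 hk2]
        have he : l.length - (-index).toNat = i0 := by rw [hi0def]; split_ifs <;> omega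
        rw [he, List.getElem?_eq_getElem hi0lt]
      · rw [PySem.List.pyGet?_of_nonneg l (by omega)]
        have he : index.toNat = i0 := by rw [hi0def]; split_ifs <;> omega
        rw [he, List.getElem?_eq_getElem hi0lt]
    have hemod : index % (l.length : Int) = (if index < 0 then index + (l.length : Int) else index) := by
      by_cases hneg : index < 0
      · rw [if_pos hneg]
        have h1 : index % (l.length : Int) = (index + (l.length : Int) * 1) % (l.length : Int) := by
          rw [Int.add_mul_emod_self_left]
        rw [h1, mul_one]
        exact Int.emod_eq_of_lt (by omega) (by omega)
      · rw [if_neg hneg]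
        exact Int.emod_eq_of_lt (by omega) (by omega)
    have hmod : (PySem.Int.mod index (l.length : Int)).toNat = i0 := by
      rw [PySem.Int.mod_eq_emod_of_pos (by exact_mod_cast hnpos), hemod, hi0def]
    have hA : swap_and_check bin_num index output =
        (List.range l.length).foldl
          (fun out j => max out (checkLongestOnes ((l.set j (l[i0]'hi0lt)).set i0 (l.getD j ' ')))) output := by
      rw [swap_and_check, hlen]
      refine PySem.List.foldl_congr_mem _ _ _ _ ?_
      intro acc j hj
      simp only [← hl, hpy, hite, Int.toNat_natCast]
      simp only [Int.max_def]
      split_ifs <;> omega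
    by_cases h0 : '0' ∈ l
    · -- '0' ∈ l: every swapped string still contains '0'
      rw [hA, swap_and_check_alt]
      simp only [← hl, hmod]
      rw [if_neg (by omega : ¬ l.length = 0), if_neg (not_not_intro h0)]
      have hmget : ∀ (j : Nat) (hj : j < l.length),
          (l.map (fun c => c == '1')).getD j false = (l[j]'hj == '1') := by
        intro j hj
        rw [List.getD_eq_getElem _ _ (by simpa using hj)]
        simp
      have hbest0 : (if pvLongest (l.map (fun c => c == '1')) > output then pvLongest (l.map (fun c => c == '1')) else output)
          = max output (pvBest (l.map (fun c => c == '1'))) := by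
        rw [pvLongest_eq_pvBest]
        simp only [Int.max_def]; split_ifs <;> omega
      rw [hbest0]
      by_cases hmi : (l.map (fun c => c == '1')).getD i0 false = true
      · rw [if_pos hmi]
        simp only [hmi, Bool.not_true]
        refine fold_pair _ _ _ (pvBest (l.map (fun c => c == '1'))) i0 (by simp only [hmi, Bool.not_true])
          (List.range l.length) output _ ?_ ?_ (Or.inl ⟨rfl, List.mem_range.2 hi0lt⟩)
        · -- differing positions: a non-'1' at j receives the '1' from i0
          intro j hj hPj
          have hjlt : j < l.length := List.mem_range.1 hj
          have hmjf : (l[j]'hjlt == '1') = false := by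
            rw [← hmget j hjlt]
            simpa using hPj
          have hmit : (l[i0]'hi0lt == '1') = true := by rw [← hmget i0 hi0lt]; exact hmi
          rw [List.getD_eq_getElem l ' ' hjlt,
              cand_true_case l i0 j hi0lt hjlt h0 hmit hmjf]
          have hFLlen : (((l.map (fun c => c == '1')).set i0 false) : List Bool).length = l.length := by simp
          have hWH : (pvMaxes (pvRuns ((l.map (fun c => c == '1')).set i0 false) 0) 0).getD (l.length - 1) 0
              = pvBest ((l.map (fun c => c == '1')).set i0 false) := by
            rw [bestPre_getD _ _ (by omega), show l.length - 1 + 1 = l.length from by omega]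
            rw [List.take_of_length_le (by omega)]
          have hPE : (if 0 < j then (pvRuns ((l.map (fun c => c == '1')).set i0 false) 0).getD (j-1) 0 else 0)
              = pvTrail (((l.map (fun c => c == '1')).set i0 false).take j) := by
            by_cases hjp : 0 < j
            · rw [if_pos hjp, runEnd_getD _ _ (by omega), show j - 1 + 1 = j from by omega]
            · rw [if_neg hjp, show j = 0 from by omega]
              simp [pvTrail, pvLead]
          have hPS : (if j + 1 < l.length then (pvRuns (((l.map (fun c => c == '1')).set i0 false) : List Bool).reverse 0).reverse.getD (j+1) 0 else 0)
              = pvLead (((l.map (fun c => c == '1')).set i0 false).drop (j+1)) := by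
            by_cases hjs : j + 1 < l.length
            · rw [if_pos hjs, runStart_getD _ _ (by omega)]
            · rw [if_neg hjs, List.drop_eq_nil_of_le (by omega)]
              simp [pvLead]
          rw [hWH, hPE, hPS]
          simp only [Int.max_def]; split_ifs <;> omega
        · -- equal positions: swapping leaves the mask unchanged
          intro j hj hPj
          have hjlt : j < l.length := List.mem_range.1 hj
          have hmjt : (l[j]'hjlt == '1') = (l[i0]'hi0lt == '1') := by
            rw [← hmget j hjlt, ← hmget i0 hi0lt, hmi]
            simpa using hPj
          rw [List.getD_eq_getElem l ' ' hjlt]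
          exact cand_same l i0 j hi0lt hjlt h0 hmjt
      · have hmif : (l.map (fun c => c == '1')).getD i0 false = false := by
          simpa using hmi
        rw [if_neg (by rw [hmif]; exact Bool.false_ne_true : ¬ ((l.map (fun c => c == '1')).getD i0 false = true))]
        simp only [hmif, Bool.not_false]
        refine fold_pair _ _ _ (pvBest (l.map (fun c => c == '1'))) i0 hmif
          (List.range l.length) output _ ?_ ?_ (Or.inl ⟨rfl, List.mem_range.2 hi0lt⟩)
        · -- differing positions: the '1' at j moves to the non-'1' index i0
          intro j hj hPj
          have hjlt : j < l.length := List.mem_range.1 hj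
          have hmjt : (l[j]'hjlt == '1') = true := by rw [← hmget j hjlt]; exact hPj
          have hmif' : (l[i0]'hi0lt == '1') = false := by rw [← hmget i0 hi0lt]; exact hmif
          rw [List.getD_eq_getElem l ' ' hjlt,
              cand_false_case l i0 j hi0lt hjlt h0 hmif' hmjt]
          have hFLlen : (((l.map (fun c => c == '1')).set i0 true) : List Bool).length = l.length := by simp
          have hL : (if 0 < j then (pvMaxes (pvRuns ((l.map (fun c => c == '1')).set i0 true) 0) 0).getD (j-1) 0 else 0)
              = pvBest (((l.map (fun c => c == '1')).set i0 true).take j) := by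
            by_cases hjp : 0 < j
            · rw [if_pos hjp, bestPre_getD _ _ (by omega), show j - 1 + 1 = j from by omega]
            · rw [if_neg hjp, show j = 0 from by omega]
              simp [pvBest]
          have hR : (if j + 1 < l.length then (pvMaxes (pvRuns (((l.map (fun c => c == '1')).set i0 true) : List Bool).reverse 0) 0).reverse.getD (j+1) 0 else 0)
              = pvBest (((l.map (fun c => c == '1')).set i0 true).drop (j+1)) := by
            by_cases hjs : j + 1 < l.length
            · rw [if_pos hjs, bestSuf_getD _ _ (by omega)]
            · rw [if_neg hjs, List.drop_eq_nil_of_le (by omega)]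
              simp [pvBest]
          rw [hL, hR]
          simp only [Int.max_def]; split_ifs <;> omega
        · -- equal positions: swapping leaves the mask unchanged
          intro j hj hPj
          have hjlt : j < l.length := List.mem_range.1 hj
          have hmjt : (l[j]'hjlt == '1') = (l[i0]'hi0lt == '1') := by
            rw [← hmget j hjlt, ← hmget i0 hi0lt, hmif]
            simpa using hPj
          rw [List.getD_eq_getElem l ' ' hjlt]
          exact cand_same l i0 j hi0lt hjlt h0 hmjt
    · -- no '0' anywhere: every swapped string still has none, every candidate is len
      rw [hA]
      have hrw : ∀ (acc : Int) (j : Nat), j ∈ List.range l.length →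
          max acc (checkLongestOnes ((l.set j (l[i0]'hi0lt)).set i0 (l.getD j ' ')))
            = max acc (l.length : Int) := by
        intro acc j hj
        have hjlt : j < l.length := List.mem_range.1 hj
        rw [List.getD_eq_getElem l ' ' hjlt]
        have hnot : ¬ ('0' ∈ (l.set j (l[i0]'hi0lt)).set i0 (l[j]'hjlt)) := by
          intro hc; exact h0 ((swap_mem l i0 j hi0lt hjlt '0').1 hc)
        rw [checkLongestOnes, if_pos hnot]
        simp
      rw [PySem.List.foldl_congr_mem _ _ _ _ hrw]
      rw [fold_const (l.length : Int) (List.range l.length) output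
        (by intro hc; rw [List.range_eq_nil] at hc; omega)]
      rw [swap_and_check_alt]
      simp only [← hl]
      rw [if_neg (by omega : ¬ l.length = 0), if_pos (by exact h0)]
      simp only [Int.max_def]; split_ifs <;> omega

-- ===== VERDICT (by name: the statement is the Claim_ definition above) =====
theorem swap_and_check_spec : Claim_equal_swap_and_check := by
  intro bin_num index output _ hpre
  unfold Spec_swap_and_check
  exact main_eq bin_num index output hpre
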